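-- pv_equiv track=rewrite | github.com/TommasoBianchi/CFR-Jr | games/goofspiel.py | build_all_possible_hands
-- ===== SOURCE A (Python) =====
-- def build_all_possible_hands(num_players, ranks):
--     """
--     Build all the possible hands for the game of Goofspiel with a given number of players and a given set of cards.
--     """
--
--     perm = all_permutations(range(1, ranks+1))
--
--     if(num_players == 0):
--         return list(map(lambda el: [el], perm))
--
--     hands = []
--     smaller_hands = build_all_possible_hands(num_players-1, ranks)
--
--     for p in perm:
--         for hand in smaller_hands:
--             hands.append(hand + [p])
--
--     return hands
--
-- def all_permutations(items):
--     """
--     Build all the possible permutations of a set of items.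
--     """
--
--     if(len(items) == 0):
--         return [[]]
--
--     permutations = []
--
--     for item in items:
--         other_items = list(filter(lambda el: el != item, items))
--         permutations_of_other = all_permutations(other_items)
--         for p in permutations_of_other:
--             p.append(item)
--             permutations.append(p)
--
--     return permutations
-- ===== SOURCE B (Python) =====
-- def _prefix_perms(items):
--     """All permutations of items, each built front-to-back (cons), in the
--     order that matches all_permutations after reversing each one."""
--     if not items:
--         return [[]]
--     return [[x] + p
--             for x in items
--             for p in _prefix_perms([y for y in items if y != x])]
--
--
-- def build_all_possible_hands(num_players, ranks):
--     perm = [list(reversed(p)) for p in _prefix_perms(list(range(1, ranks + 1)))]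
--     hands = [[]]
--     for _ in range(num_players + 1):
--         hands = [[p] + h for h in hands for p in perm]
--     return hands
-- ===== Notes on version B (the rewrite author's own statement) =====
-- stated objective: alternative
-- what changed: B replaces A's recursion over num_players by a single iterative product loop that prepends the fastest-varying hand coordinate, and builds each permutation front-to-back by cons with one final reverse instead of A's filter-recurse-append; same asymptotic cost.
-- outside the precondition, e.g. on build_all_possible_hands(-1, 2): A raises RecursionError, B returns [[]]
import Mathlib
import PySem

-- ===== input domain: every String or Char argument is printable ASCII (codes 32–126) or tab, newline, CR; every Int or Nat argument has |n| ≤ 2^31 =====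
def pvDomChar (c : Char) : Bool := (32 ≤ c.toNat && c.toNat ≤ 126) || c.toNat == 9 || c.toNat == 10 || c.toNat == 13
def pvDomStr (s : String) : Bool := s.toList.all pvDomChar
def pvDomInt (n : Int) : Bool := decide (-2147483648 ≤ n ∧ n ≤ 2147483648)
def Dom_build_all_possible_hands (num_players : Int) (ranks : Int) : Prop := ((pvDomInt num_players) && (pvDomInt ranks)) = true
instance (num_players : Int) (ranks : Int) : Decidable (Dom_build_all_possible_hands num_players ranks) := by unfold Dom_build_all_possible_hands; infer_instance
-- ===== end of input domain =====

-- B replaces A's recursion over num_players by one iterative product loop that prepends the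
-- fastest-varying coordinate, and builds each permutation front-to-back (cons) with a final
-- reverse instead of A's append-at-the-end; objective: alternative (same cost).

-- termination helper for both ports (removing a present element strictly shrinks the list)
theorem pv_filter_lt {x : Int} {l : List Int} (hx : x ∈ l) :
    (l.filter (fun y => y ≠ x)).length < l.length := by
  apply List.length_filter_lt_length_iff_exists.mpr
  exact ⟨x, hx, by simp⟩

theorem pv_filter_lt_attach {x : Int} {l : List Int} (hx : x ∈ l) :
    ((l.attach.filter (fun (y : {a // a ∈ l}) => decide ((y : Int) ≠ x))).unattach).length < l.length := by
  simp only [List.length_unattach]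
  have h1 := List.countP_attach (l := l) (p := fun y => decide (y ≠ x))
  rw [List.countP_eq_length_filter, List.countP_eq_length_filter] at h1
  exact lt_of_eq_of_lt h1 (pv_filter_lt hx)

-- ===== PORT A =====
def all_permutations (items : List Int) : List (List Int) :=
  if items.length = 0 then [[]]
  else
    items.attach.flatMap (fun ⟨item, hmem⟩ =>
      (all_permutations (items.filter (fun el => el ≠ item))).map (fun p => p ++ [item]))
termination_by items.length
decreasing_by exact pv_filter_lt_attach hmem

def build_all_possible_hands (num_players : Int) (ranks : Int) : List (List (List Int)) :=
  let perm := all_permutations (PySem.List.pyRange 1 (ranks + 1) 1)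
  if num_players = 0 then perm.map (fun el => [el])
  else if num_players < 0 then []   -- totalization guard: Python recurses without bound here (outside Pre_)
  else
    let smaller := build_all_possible_hands (num_players - 1) ranks
    perm.flatMap (fun p => smaller.map (fun hand => hand ++ [p]))
termination_by num_players.toNat
decreasing_by omega

-- ===== PORT B =====
def prefix_perms (items : List Int) : List (List Int) :=
  if items = [] then [[]]
  else
    items.attach.flatMap (fun ⟨x, hmem⟩ =>
      (prefix_perms (items.filter (fun y => y ≠ x))).map (fun p => x :: p))
termination_by items.length
decreasing_by exact pv_filter_lt_attach hmem

def build_all_possible_hands_alt (num_players : Int) (ranks : Int) : List (List (List Int)) :=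
  let perm := (prefix_perms (PySem.List.pyRange 1 (ranks + 1) 1)).map List.reverse
  (List.range (num_players + 1).toNat).foldl
    (fun hands _ => hands.flatMap (fun h => perm.map (fun p => p :: h))) [[]]

-- ===== PRECONDITION & SPEC =====
-- Pre_ excludes negative num_players (A recurses without bound: RecursionError) and deep-recursion
-- inputs (num_players + ranks beyond 4000, a margin under the interpreter's recursion limit, B's
-- recursion taking two frames per rank), where recursion raises RecursionError instead of returning.
def Pre_build_all_possible_hands (num_players : Int) (ranks : Int) : Prop :=
  0 ≤ num_players ∧ num_players + max ranks 0 ≤ 4000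
instance (num_players : Int) (ranks : Int) : Decidable (Pre_build_all_possible_hands num_players ranks) := by unfold Pre_build_all_possible_hands; infer_instance
def pvWitness_build_all_possible_hands : Int × Int := (1, 2)


def Spec_build_all_possible_hands (num_players : Int) (ranks : Int) (out : List (List (List Int))) : Prop := out = build_all_possible_hands_alt num_players ranks
instance (num_players : Int) (ranks : Int) (out : List (List (List Int))) : Decidable (Spec_build_all_possible_hands num_players ranks out) := by unfold Spec_build_all_possible_hands; infer_instance

-- ===== CLAIM (what is proved, stated in full; the proofs are below) =====
def Claim_equal_build_all_possible_hands : Prop := ∀ (num_players : Int) (ranks : Int), Dom_build_all_possible_hands num_players ranks → Pre_build_all_possible_hands num_players ranks → Spec_build_all_possible_hands num_players ranks (build_all_possible_hands num_players ranks)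

-- ===== LEMMAS AND PROOFS =====

-- A's permutations are B's front-built permutations, each reversed
theorem perms_eq (items : List Int) :
    all_permutations items = (prefix_perms items).map List.reverse := by
  rw [all_permutations.eq_def, prefix_perms.eq_def]
  by_cases h : items = []
  · simp [h]
  · have hl : ¬ items.length = 0 := by simpa [List.length_eq_zero_iff] using h
    rw [if_neg hl, if_neg h, List.map_flatMap]
    refine congrArg items.attach.flatMap (funext fun ⟨x, hx⟩ => ?_)
    dsimp only
    rw [perms_eq (items.filter (fun y => y ≠ x)), List.map_map, List.map_map]
    simp [Function.comp]
termination_by items.length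
decreasing_by simpa using pv_filter_lt hx

-- the iterative product state of B after k rounds
def pvG (perm : List (List Int)) (k : Nat) : List (List (List Int)) :=
  (List.range k).foldl (fun hands _ => hands.flatMap (fun h => perm.map (fun p => p :: h))) [[]]

theorem pvG_succ (perm : List (List Int)) (k : Nat) :
    pvG perm (k + 1) = (pvG perm k).flatMap (fun h => perm.map (fun p => p :: h)) := by
  simp [pvG, List.range_succ]

-- appending a new slowest coordinate at the back = one more front-building round
theorem pvG_step (perm : List (List Int)) (k : Nat) :
    perm.flatMap (fun p => (pvG perm k).map (fun h => h ++ [p])) = pvG perm (k + 1) := by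
  induction k with
  | zero =>
    simp only [pvG, List.range_succ, List.range_zero, List.foldl_nil, List.foldl_cons,
      List.nil_append]
    induction perm <;> simp_all [List.flatMap]
  | succ k ih =>
    rw [pvG_succ perm (k + 1)]
    conv_lhs => rw [pvG_succ perm k]
    rw [← ih]
    simp [Function.comp_def, List.flatMap_assoc, List.map_flatMap, List.flatMap_map, List.map_map,
      List.cons_append]

theorem hands_eq (ranks : Int) (n : Nat) :
    build_all_possible_hands (n : Int) ranks =
      pvG ((prefix_perms (PySem.List.pyRange 1 (ranks + 1) 1)).map List.reverse) (n + 1) := by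
  induction n with
  | zero =>
    rw [build_all_possible_hands.eq_def]
    simp only [Nat.cast_zero, perms_eq]
    simp only [pvG, List.range_succ, List.range_zero, List.foldl_nil, List.foldl_cons,
      List.nil_append]
    induction (prefix_perms (PySem.List.pyRange 1 (ranks + 1) 1)).map List.reverse <;>
      simp_all [List.flatMap]
  | succ n ih =>
    rw [build_all_possible_hands.eq_def]
    have h0 : ¬ ((n + 1 : Nat) : Int) = 0 := by omega
    have h1 : ¬ ((n + 1 : Nat) : Int) < 0 := by omega
    have h2 : ((n + 1 : Nat) : Int) - 1 = (n : Int) := by omega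
    rw [if_neg h0, if_neg h1]
    simp only [h2, ih, perms_eq]
    exact pvG_step _ (n + 1)

-- ===== VERDICT (by name: the statement is the Claim_ definition above) =====
theorem build_all_possible_hands_spec : Claim_equal_build_all_possible_hands := by
  intro num_players ranks _hdom hpre
  have h0 : (0 : Int) ≤ num_players := hpre.1
  unfold Spec_build_all_possible_hands build_all_possible_hands_alt
  obtain ⟨n, rfl⟩ : ∃ n : Nat, num_players = (n : Int) :=
    ⟨num_players.toNat, by omega⟩
  have ht : ((n : Int) + 1).toNat = n + 1 := by omega
  rw [ht, hands_eq ranks n]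
  rfl
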